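-- pv_equiv track=rewrite | github.com/ttaflutter/game_plus | game_plus_api/app/api/match_history.py | find_winning_line
-- ===== SOURCE A (Python) =====
-- from typing import List, Optional
--
-- def find_winning_line(board: List[List[Optional[str]]], win_len: int) -> Optional[List[dict]]:
--     """
--     Tìm đường thắng trên bàn cờ.
--     Returns: List of coordinates [{"x": 0, "y": 0}, ...] hoặc None
--     """
--     rows = len(board)
--     cols = len(board[0]) if rows > 0 else 0
--
--     # Check horizontal
--     for r in range(rows):
--         for c in range(cols - win_len + 1):
--             symbol = board[r][c]
--             if symbol and all(board[r][c + i] == symbol for i in range(win_len)):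
--                 return [{"x": r, "y": c + i} for i in range(win_len)]
--
--     # Check vertical
--     for r in range(rows - win_len + 1):
--         for c in range(cols):
--             symbol = board[r][c]
--             if symbol and all(board[r + i][c] == symbol for i in range(win_len)):
--                 return [{"x": r + i, "y": c} for i in range(win_len)]
--
--     # Check diagonal (top-left to bottom-right)
--     for r in range(rows - win_len + 1):
--         for c in range(cols - win_len + 1):
--             symbol = board[r][c]
--             if symbol and all(board[r + i][c + i] == symbol for i in range(win_len)):
--                 return [{"x": r + i, "y": c + i} for i in range(win_len)]
--
--     # Check diagonal (top-right to bottom-left)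
--     for r in range(rows - win_len + 1):
--         for c in range(win_len - 1, cols):
--             symbol = board[r][c]
--             if symbol and all(board[r + i][c - i] == symbol for i in range(win_len)):
--                 return [{"x": r + i, "y": c - i} for i in range(win_len)]
--
--     return None
-- ===== SOURCE B (Python) =====
-- from typing import List, Optional
--
-- def find_winning_line(board: List[List[Optional[str]]], win_len: int) -> Optional[List[dict]]:
--     """Run-length scan per line (O(rows*cols) per direction) instead of a
--     window check at every start cell (O(rows*cols*win_len))."""
--     rows = len(board)
--     cols = len(board[0]) if rows > 0 else 0
--     grid = [row[:cols] + [None] * (cols - len(row)) for row in board]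
--
--     def scan(line):
--         # index of the cell that completes the first run of win_len equal
--         # truthy cells, or None
--         run_sym, run_len = None, 0
--         for j, cell in enumerate(line):
--             if cell and cell == run_sym:
--                 run_len += 1
--             elif cell:
--                 run_sym, run_len = cell, 1
--             else:
--                 run_sym, run_len = None, 0
--             if run_len == win_len:
--                 return j
--         return None
--
--     # horizontal: rows top-down, first completed run
--     for r in range(rows):
--         j = scan(grid[r])
--         if j is not None:
--             return [{"x": r, "y": j - win_len + 1 + i} for i in range(win_len)]
--
--     def best_line(lines):
--         # each line is a list of coordinates with strictly increasing row;
--         # lines are ordered so that on equal starting row the earlier line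
--         # has the smaller starting column -> strict '<' keeps A's order
--         best = None
--         for coords in lines:
--             j = scan([grid[r][c] for (r, c) in coords])
--             if j is not None:
--                 seg = coords[j - win_len + 1: j + 1]
--                 if best is None or seg[0][0] < best[0][0]:
--                     best = seg
--         if best is None:
--             return None
--         return [{"x": r, "y": c} for (r, c) in best]
--
--     # vertical: columns left to right
--     w = best_line([[(r, c) for r in range(rows)] for c in range(cols)])
--     if w is not None:
--         return w
--     # diagonal down-right: constant c - r = d, d ascending
--     w = best_line([[(r, r + d) for r in range(max(0, -d), min(rows, cols - d))]
--                    for d in range(-(rows - 1), cols)] if rows > 0 else [])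
--     if w is not None:
--         return w
--     # diagonal down-left: constant c + r = d, d ascending
--     w = best_line([[(r, d - r) for r in range(max(0, d - cols + 1), min(rows, d + 1))]
--                    for d in range(rows + cols - 1)])
--     if w is not None:
--         return w
--     return None
-- ===== Notes on version B (the rewrite author's own statement) =====
-- stated objective: alternative
-- what changed: A re-tests a full win_len window at every start cell of every row/column/diagonal; B instead makes one incremental run-length scan along each row, column and diagonal and keeps the lexicographically first completed run, preserving A's scan order and tie-breaking exactly (worst-case O(rows*cols) per direction instead of O(rows*cols*win_len), but not measurably faster on the benchmark inputs, where A's window check exits early).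
-- outside the precondition, e.g. on find_winning_line([['X']], 0): A returns [], B returns None
import Mathlib
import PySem

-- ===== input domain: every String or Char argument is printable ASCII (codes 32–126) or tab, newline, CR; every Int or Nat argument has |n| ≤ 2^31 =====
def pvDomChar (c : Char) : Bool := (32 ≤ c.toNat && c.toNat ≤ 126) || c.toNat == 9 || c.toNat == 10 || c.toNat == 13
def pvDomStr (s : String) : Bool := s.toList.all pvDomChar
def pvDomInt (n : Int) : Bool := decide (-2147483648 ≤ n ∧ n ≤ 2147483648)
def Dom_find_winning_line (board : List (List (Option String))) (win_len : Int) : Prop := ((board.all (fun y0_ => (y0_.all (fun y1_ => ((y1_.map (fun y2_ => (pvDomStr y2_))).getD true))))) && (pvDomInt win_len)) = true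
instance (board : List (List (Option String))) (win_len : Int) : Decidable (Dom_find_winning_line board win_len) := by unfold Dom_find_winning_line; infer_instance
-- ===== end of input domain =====

-- B replaces A's per-start-cell window re-checking with one incremental run-length scan per
-- row/column/diagonal, keeping A's scan order and tie-breaking (an alternative algorithm).
-- ===== PORT A =====
-- helpers shared syntax: Python truthiness of an Optional[str] and board[r][c]
def pvTruthy (v : Option String) : Bool :=
  match v with
  | none => false
  | some s => !(s == "")

def pvCell (g : List (List (Option String))) (r c : Int) : Option String :=
  match PySem.List.pyGet? g r with
  | none => none          -- IndexError in Python: excluded by Pre_ on every reached index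
  | some row => (PySem.List.pyGet? row c).getD none

def find_winning_line (board : List (List (Option String))) (win_len : Int) : Option (List (List (String × Int))) :=
  let rows : Int := (board.length : Int)
  let cols : Int := if rows > 0 then ((board.headD []).length : Int) else 0
  match (PySem.List.pyRange 0 rows 1).findSome? (fun r =>
    (PySem.List.pyRange 0 (cols - win_len + 1) 1).findSome? (fun c =>
      let symbol := pvCell board r c
      if pvTruthy symbol && (PySem.List.pyRange 0 win_len 1).all (fun i => pvCell board r (c + i) == symbol)
      then some ((PySem.List.pyRange 0 win_len 1).map (fun i => [("x", r), ("y", c + i)]))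
      else none)) with
  | some res => some res
  | none =>
  match (PySem.List.pyRange 0 (rows - win_len + 1) 1).findSome? (fun r =>
    (PySem.List.pyRange 0 cols 1).findSome? (fun c =>
      let symbol := pvCell board r c
      if pvTruthy symbol && (PySem.List.pyRange 0 win_len 1).all (fun i => pvCell board (r + i) c == symbol)
      then some ((PySem.List.pyRange 0 win_len 1).map (fun i => [("x", r + i), ("y", c)]))
      else none)) with
  | some res => some res
  | none =>
  match (PySem.List.pyRange 0 (rows - win_len + 1) 1).findSome? (fun r =>
    (PySem.List.pyRange 0 (cols - win_len + 1) 1).findSome? (fun c =>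
      let symbol := pvCell board r c
      if pvTruthy symbol && (PySem.List.pyRange 0 win_len 1).all (fun i => pvCell board (r + i) (c + i) == symbol)
      then some ((PySem.List.pyRange 0 win_len 1).map (fun i => [("x", r + i), ("y", c + i)]))
      else none)) with
  | some res => some res
  | none =>
  match (PySem.List.pyRange 0 (rows - win_len + 1) 1).findSome? (fun r =>
    (PySem.List.pyRange (win_len - 1) cols 1).findSome? (fun c =>
      let symbol := pvCell board r c
      if pvTruthy symbol && (PySem.List.pyRange 0 win_len 1).all (fun i => pvCell board (r + i) (c - i) == symbol)
      then some ((PySem.List.pyRange 0 win_len 1).map (fun i => [("x", r + i), ("y", c - i)]))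
      else none)) with
  | some res => some res
  | none => none

-- ===== PORT B =====
-- scan: index of the cell completing the first run of k equal truthy cells
def pvScan (k : Int) : List (Option String) → Option String → Int → Int → Option Int
  | [], _, _, _ => none
  | cell :: rest, runSym, runLen, j =>
    let st : Option String × Int :=
      if pvTruthy cell && (cell == runSym) then (runSym, runLen + 1)
      else if pvTruthy cell then (cell, 1)
      else (none, 0)
    if st.2 == k then some j else pvScan k rest st.1 st.2 (j + 1)

-- best_line: fold over the lines keeping the winning segment with the smallest starting row
def pvBestLine (g : List (List (Option String))) (k : Int) (lines : List (List (Int × Int))) : Option (List (List (String × Int))) :=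
  let best := lines.foldl (fun best coords =>
    match pvScan k (coords.map (fun rc => pvCell g rc.1 rc.2)) none 0 0 with
    | none => best
    | some j =>
      let seg := PySem.List.slice coords (some (j - k + 1)) (some (j + 1))
      match best with
      | none => some seg
      | some b =>
        if (PySem.List.pyGetD seg 0 ((0 : Int), (0 : Int))).1 < (PySem.List.pyGetD b 0 ((0 : Int), (0 : Int))).1
        then some seg else some b) none
  match best with
  | none => none
  | some b => some (b.map (fun rc => [("x", rc.1), ("y", rc.2)]))

def find_winning_line_alt (board : List (List (Option String))) (win_len : Int) : Option (List (List (String × Int))) :=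
  let rows : Int := (board.length : Int)
  let cols : Int := if rows > 0 then ((board.headD []).length : Int) else 0
  let grid := board.map (fun row => PySem.List.slice row none (some cols) ++ List.replicate ((cols - (row.length : Int)).toNat) (none : Option String))
  match (PySem.List.pyRange 0 rows 1).findSome? (fun r =>
    match pvScan win_len ((PySem.List.pyGet? grid r).getD []) none 0 0 with
    | none => none
    | some j => some ((PySem.List.pyRange 0 win_len 1).map (fun i => [("x", r), ("y", j - win_len + 1 + i)]))) with
  | some w => some w
  | none =>
  match pvBestLine grid win_len ((PySem.List.pyRange 0 cols 1).map (fun c =>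
      (PySem.List.pyRange 0 rows 1).map (fun r => (r, c)))) with
  | some w => some w
  | none =>
  match pvBestLine grid win_len (if rows > 0 then
      (PySem.List.pyRange (-(rows - 1)) cols 1).map (fun d =>
        (PySem.List.pyRange (max 0 (-d)) (min rows (cols - d)) 1).map (fun r => (r, r + d)))
      else []) with
  | some w => some w
  | none =>
  match pvBestLine grid win_len ((PySem.List.pyRange 0 (rows + cols - 1) 1).map (fun d =>
      (PySem.List.pyRange (max 0 (d - cols + 1)) (min rows (d + 1)) 1).map (fun r => (r, d - r)))) with
  | some w => some w
  | none => none

-- ===== PRECONDITION & SPEC =====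
-- Pre_ excludes win_len < 1 (there A either raises IndexError or accidentally returns an
-- empty line []) and ragged boards with a row shorter than row 0 unless the board is too small
-- to hold any line (there A raises IndexError on most shapes, or returns a value only by
-- accident of its early-exit scan order).
def Pre_find_winning_line (board : List (List (Option String))) (win_len : Int) : Prop :=
  1 ≤ win_len ∧
    ((∀ row ∈ board, (board.headD []).length ≤ row.length) ∨
      ((board.length : Int) < win_len ∧ ((board.headD []).length : Int) < win_len))
instance (board : List (List (Option String))) (win_len : Int) : Decidable (Pre_find_winning_line board win_len) := by unfold Pre_find_winning_line; infer_instance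

def pvWitness_find_winning_line : List (List (Option String)) × Int :=
  ([[some "X", some "X"], [some "O", none]], 2)

def Spec_find_winning_line (board : List (List (Option String))) (win_len : Int) (out : Option (List (List (String × Int)))) : Prop := out = find_winning_line_alt board win_len
instance (board : List (List (Option String))) (win_len : Int) (out : Option (List (List (String × Int)))) : Decidable (Spec_find_winning_line board win_len out) := by unfold Spec_find_winning_line; infer_instance

-- ===== CLAIM (what is proved, stated in full; the proofs are below) =====
def Claim_equal_find_winning_line : Prop := ∀ (board : List (List (Option String))) (win_len : Int), Dom_find_winning_line board win_len → Pre_find_winning_line board win_len → Spec_find_winning_line board win_len (find_winning_line board win_len)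

-- ===== LEMMAS AND PROOFS =====\n-- ===== generic ordered-search tools =====
theorem pvFindSome?_congr {α β : Type} (l : List α) (F G : α → Option β)
    (h : ∀ x ∈ l, F x = G x) : l.findSome? F = l.findSome? G := by
  induction l with
  | nil => rfl
  | cons a t ih =>
    simp only [List.findSome?_cons]
    rw [h a (by simp)]
    cases G a with
    | none => exact ih (fun x hx => h x (by simp [hx]))
    | some v => rfl

theorem pvFindSome?_map {α β γ : Type} (l : List α) (F : α → Option β) (g : β → γ) :
    l.findSome? (fun x => (F x).map g) = (l.findSome? F).map g := by
  induction l with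
  | nil => rfl
  | cons a t ih =>
    simp only [List.findSome?_cons]
    cases F a <;> simp [ih]

theorem pvFindSome?_guard {α β : Type} (l : List α) (p : α → Bool) (f : α → β) :
    l.findSome? (fun x => if p x then some (f x) else none) = (l.find? p).map f := by
  induction l with
  | nil => rfl
  | cons a t ih =>
    simp only [List.findSome?_cons, List.find?_cons]
    by_cases h : p a <;> simp [h, ih]

theorem pvFindSome?_first {α β : Type} [LinearOrder α] (l : List α) (F : α → Option β) (x : α) (v : β)
    (hasc : l.Pairwise (· < ·)) (hx : x ∈ l) (hv : F x = some v)
    (hmin : ∀ y ∈ l, y < x → F y = none) : l.findSome? F = some v := by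
  induction l with
  | nil => simp at hx
  | cons a t ih =>
    simp only [List.findSome?_cons]
    rcases List.mem_cons.1 hx with rfl | hxt
    · rw [hv]
    · have hax : a < x := (List.pairwise_cons.1 hasc).1 x hxt
      rw [hmin a (by simp) hax]
      exact ih (List.pairwise_cons.1 hasc).2 hxt (fun y hy h => hmin y (by simp [hy]) h)

theorem pvFindSome?_char {α β : Type} [LinearOrder α] (l : List α) (F : α → Option β) (v : β)
    (hasc : l.Pairwise (· < ·)) (h : l.findSome? F = some v) :
    ∃ x ∈ l, F x = some v ∧ ∀ y ∈ l, y < x → F y = none := by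
  induction l with
  | nil => simp [List.findSome?] at h
  | cons a t ih =>
    simp only [List.findSome?_cons] at h
    rcases ha : F a with _ | w
    · rw [ha] at h
      obtain ⟨x, hx, hv, hmin⟩ := ih (List.pairwise_cons.1 hasc).2 h
      exact ⟨x, by simp [hx], hv, fun y hy hlt => by
        rcases List.mem_cons.1 hy with rfl | hyt
        · exact ha
        · exact hmin y hyt hlt⟩
    · rw [ha] at h; simp only [Option.some.injEq] at h; subst h
      refine ⟨a, by simp, ha, fun y hy hlt => ?_⟩
      rcases List.mem_cons.1 hy with rfl | hyt
      · exact absurd hlt (lt_irrefl _)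
      · exact absurd hlt (not_lt.2 ((List.pairwise_cons.1 hasc).1 y hyt).le)

theorem pvFind?_first {α : Type} [LinearOrder α] (l : List α) (p : α → Bool) (x : α)
    (hasc : l.Pairwise (· < ·)) (hx : x ∈ l) (hp : p x = true)
    (hmin : ∀ y ∈ l, y < x → p y = false) : l.find? p = some x := by
  induction l with
  | nil => simp at hx
  | cons a t ih =>
    simp only [List.find?_cons]
    rcases List.mem_cons.1 hx with rfl | hxt
    · simp [hp]
    · have hax : a < x := (List.pairwise_cons.1 hasc).1 x hxt
      rw [hmin a (by simp) hax]
      exact ih (List.pairwise_cons.1 hasc).2 hxt (fun y hy h => hmin y (by simp [hy]) h)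

theorem pvFind?_min {α : Type} [LinearOrder α] (l : List α) (p : α → Bool) (x : α)
    (hasc : l.Pairwise (· < ·)) (h : l.find? p = some x) : ∀ y ∈ l, y < x → p y = false := by
  induction l with
  | nil => simp at h
  | cons a t ih =>
    intro y hy hlt
    rcases ha : p a with _ | _
    · rw [List.find?_cons, ha] at h
      rcases List.mem_cons.1 hy with rfl | hyt
      · exact ha
      · exact ih (List.pairwise_cons.1 hasc).2 h y hyt hlt
    · rw [List.find?_cons, ha] at h
      simp only [Option.some.injEq] at h; subst h
      rcases List.mem_cons.1 hy with rfl | hyt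
      · exact absurd hlt (lt_irrefl _)
      · exact absurd hlt (not_lt.2 ((List.pairwise_cons.1 hasc).1 y hyt).le)

-- ===== window predicate and first window =====
def pvWinAt (xs : List (Option String)) (k i : Nat) : Bool :=
  decide (i + k ≤ xs.length) && pvTruthy (xs.getD i none) &&
    (List.range k).all (fun t => xs.getD (i+t) none == xs.getD i none)

def pvFirstWin (xs : List (Option String)) (k : Nat) : Option Nat :=
  (List.range xs.length).find? (pvWinAt xs k)

theorem pvWinAt_short {xs : List (Option String)} {k i : Nat} (h : xs.length < i + k) :
    pvWinAt xs k i = false := by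
  simp [pvWinAt]; omega

theorem pvFirstWin_none_iff {xs : List (Option String)} {k : Nat} (hk : 1 ≤ k) :
    pvFirstWin xs k = none ↔ ∀ i, pvWinAt xs k i = false := by
  unfold pvFirstWin
  rw [List.find?_eq_none]
  constructor
  · intro h i
    by_cases hi : i < xs.length
    · simpa using h i (List.mem_range.2 hi)
    · exact pvWinAt_short (by omega)
  · intro h i _; simp [h i]

theorem pvFirstWin_some {xs : List (Option String)} {k i : Nat} (h : pvFirstWin xs k = some i) :
    pvWinAt xs k i = true ∧ ∀ j, j < i → pvWinAt xs k j = false := by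
  refine ⟨List.find?_some h, fun j hj => ?_⟩
  have hi : i ∈ List.range xs.length := List.mem_of_find?_eq_some h
  exact pvFind?_min _ _ _ List.pairwise_lt_range h j
    (List.mem_range.2 (lt_trans hj (List.mem_range.1 hi))) hj

theorem pvFirstWin_first {xs : List (Option String)} {k i : Nat} (hk : 1 ≤ k)
    (hw : pvWinAt xs k i = true) (hmin : ∀ j, j < i → pvWinAt xs k j = false) :
    pvFirstWin xs k = some i := by
  have hlen : i + k ≤ xs.length := by
    by_contra h
    rw [pvWinAt_short (by omega)] at hw; exact absurd hw (by simp)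
  exact pvFind?_first _ _ _ List.pairwise_lt_range
    (List.mem_range.2 (by omega)) hw (fun y _ => hmin y)

def pvPad : Option String → Nat → List (Option String)
  | some s, l => List.replicate l (some s)
  | none, _ => []

theorem pvAll_congr {α : Type} (l : List α) (p q : α → Bool) (h : ∀ x ∈ l, p x = q x) :
    l.all p = l.all q := by
  induction l with
  | nil => rfl
  | cons a t ih => simp only [List.all_cons, h a (by simp), ih (fun x hx => h x (by simp [hx]))]

theorem pvOptionMap_congr {α β : Type} {o : Option α} {f g : α → β} (h : ∀ a, f a = g a) :
    o.map f = o.map g := by cases o <;> simp [h]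

theorem pvWinAt_drop {xs : List (Option String)} {k : Nat} (hk : 1 ≤ k) (m : Nat)
    (hm : m ≤ xs.length) (i : Nat) : pvWinAt (xs.drop m) k i = pvWinAt xs k (m + i) := by
  have hget : ∀ t : Nat, (xs.drop m).getD t none = xs.getD (m + t) none := by
    intro t
    simp [List.getD_eq_getElem?_getD, List.getElem?_drop]
  simp only [pvWinAt, hget, List.length_drop]
  have h1 : decide (i + k ≤ xs.length - m) = decide (m + i + k ≤ xs.length) := by
    rw [decide_eq_decide]; omega
  rw [h1]
  congr 1
  apply pvAll_congr
  intro t _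
  rw [show m + (i + t) = m + i + t by omega]

theorem pvFirstWin_shift {xs : List (Option String)} {k : Nat} (hk : 1 ≤ k) (m : Nat)
    (hm : m ≤ xs.length) (h : ∀ i, i < m → pvWinAt xs k i = false) :
    pvFirstWin xs k = (pvFirstWin (xs.drop m) k).map (· + m) := by
  rcases h' : pvFirstWin (xs.drop m) k with _ | i
  · simp only [Option.map_none]
    rw [pvFirstWin_none_iff hk]
    intro i
    by_cases hi : i < m
    · exact h i hi
    · have := (pvFirstWin_none_iff hk).1 h' (i - m)
      rw [pvWinAt_drop hk m hm] at this
      rwa [show m + (i - m) = i by omega] at this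
  · obtain ⟨hw, hmin⟩ := pvFirstWin_some h'
    rw [pvWinAt_drop hk m hm] at hw
    simp only [Option.map_some]
    apply pvFirstWin_first hk (by rwa [show i + m = m + i by omega])
    intro j hj
    by_cases hjm : j < m
    · exact h j hjm
    · have := hmin (j - m) (by omega)
      rw [pvWinAt_drop hk m hm] at this
      rwa [show m + (j - m) = j by omega] at this

theorem pvBeq_falsy_truthy {cell : Option String} {s : String}
    (h1 : pvTruthy cell = false) (h2 : pvTruthy (some s) = true) : (cell == some s) = false := by
  cases cell with
  | none => rfl
  | some s0 =>
    simp only [pvTruthy, Bool.not_eq_eq_eq_not, Bool.not_false] at h1 h2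
    have hs0 : s0 = "" := by simpa using h1
    subst hs0
    simp only [beq_eq_false_iff_ne, ne_eq, Option.some.injEq]
    intro hcon
    rw [← hcon] at h2
    simp at h2

theorem pvWinAt_break {l k i0 : Nat} (hil : i0 < l) (hlk : l < k) (s : String)
    (cell : Option String) (rest : List (Option String)) (hcell : (cell == some s) = false) :
    pvWinAt (List.replicate l (some s) ++ cell :: rest) k i0 = false := by
  have hgi : (List.replicate l (some s) ++ cell :: rest).getD i0 none = some s := by
    rw [List.getD_eq_getElem?_getD, List.getElem?_append_left (by simp; omega),
      List.getElem?_replicate_of_lt hil]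
    rfl
  have hgl : (List.replicate l (some s) ++ cell :: rest).getD l none = cell := by
    rw [List.getD_eq_getElem?_getD,
      show l = (List.replicate l (some s)).length by simp, List.getElem?_append_right (by simp)]
    simp
  have hall : (List.range k).all
      (fun t => (List.replicate l (some s) ++ cell :: rest).getD (i0+t) none
        == (List.replicate l (some s) ++ cell :: rest).getD i0 none) = false := by
    rw [List.all_eq_false]
    refine ⟨l - i0, List.mem_range.2 (by omega), ?_⟩
    rw [show i0 + (l - i0) = l by omega, hgl, hgi, hcell]
    simp
  simp only [pvWinAt, hall, Bool.and_false]

theorem pvWinAt_at_pad_len {k : Nat} (pad : List (Option String)) (cell : Option String)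
    (rest : List (Option String)) (h : pvTruthy cell = false) :
    pvWinAt (pad ++ cell :: rest) k pad.length = false := by
  have hgl : (pad ++ cell :: rest).getD pad.length none = cell := by
    rw [List.getD_eq_getElem?_getD, List.getElem?_append_right (by omega)]
    simp
  simp only [pvWinAt, hgl, h, Bool.and_false, Bool.false_and]

theorem pvWinAt_head_full {s : String} (hs : pvTruthy (some s) = true) {k : Nat} (hk : 1 ≤ k)
    (rest : List (Option String)) :
    pvWinAt (List.replicate (k-1) (some s) ++ some s :: rest) k 0 = true := by
  have hget : ∀ t, t < k → (List.replicate (k-1) (some s) ++ some s :: rest).getD t none = some s := by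
    intro t ht
    by_cases h : t < k - 1
    · rw [List.getD_eq_getElem?_getD, List.getElem?_append_left (by simp; omega),
        List.getElem?_replicate_of_lt h]
      rfl
    · have : t = k - 1 := by omega
      subst this
      rw [List.getD_eq_getElem?_getD,
        show k - 1 = (List.replicate (k-1) (some s : Option String)).length by simp,
        List.getElem?_append_right (by simp)]
      simp
  simp only [pvWinAt]
  simp only [Bool.and_eq_true]
  refine ⟨⟨?_, ?_⟩, ?_⟩
  · simp; omega
  · rw [hget 0 (by omega)]; exact hs
  · rw [List.all_eq_true]
    intro t ht
    rw [show (0:Nat) + t = t by omega, hget t (List.mem_range.1 ht), hget 0 (by omega)]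
    simp

theorem pvScan_cons (k : Int) (cell : Option String) (rest : List (Option String))
    (sym : Option String) (l j : Int) :
    pvScan k (cell :: rest) sym l j =
      (let st : Option String × Int :=
        if pvTruthy cell && (cell == sym) then (sym, l + 1)
        else if pvTruthy cell then (cell, 1)
        else (none, 0)
      if st.2 == k then some j else pvScan k rest st.1 st.2 (j + 1)) := rfl

theorem pvScan_cons_cont {cell sym : Option String} (h1 : pvTruthy cell = true)
    (h2 : (cell == sym) = true) (k : Int) (rest : List (Option String)) (l j : Int) :
    pvScan k (cell :: rest) sym l j =
      if ((l + 1) == k) = true then some j else pvScan k rest sym (l+1) (j+1) := by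
  rw [pvScan_cons]; simp only [h1, h2, Bool.and_self, if_true]

theorem pvScan_cons_new {cell sym : Option String} (h1 : pvTruthy cell = true)
    (h2 : (cell == sym) = false) (k : Int) (rest : List (Option String)) (l j : Int) :
    pvScan k (cell :: rest) sym l j =
      if ((1 : Int) == k) = true then some j else pvScan k rest cell 1 (j+1) := by
  rw [pvScan_cons]
  simp only [h1, h2, Bool.true_and, Bool.false_eq_true, if_false, if_true]

theorem pvScan_cons_reset {cell : Option String} (h1 : pvTruthy cell = false)
    (sym : Option String) (k : Int) (rest : List (Option String)) (l j : Int) :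
    pvScan k (cell :: rest) sym l j =
      if ((0 : Int) == k) = true then some j else pvScan k rest none 0 (j+1) := by
  rw [pvScan_cons]
  simp only [h1, Bool.false_and, Bool.false_eq_true, if_false]

theorem pvScan_spec {k : Nat} (hk : 1 ≤ k) (xs : List (Option String)) :
    ∀ (sym : Option String) (l : Nat) (j : Int),
    ((sym = none ∧ l = 0) ∨ (∃ s, sym = some s ∧ pvTruthy (some s) = true ∧ 1 ≤ l ∧ l < k)) →
    pvScan (k : Int) xs sym (l : Int) j
      = (pvFirstWin (pvPad sym l ++ xs) k).map (fun i : Nat => (i : Int) + k - 1 - l + j) := by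
  have padlen : ∀ sym l, ((sym = none ∧ l = 0) ∨ (∃ s, sym = some s ∧ pvTruthy (some s) = true ∧ 1 ≤ l ∧ l < k)) → (pvPad sym l).length = l := by
    rintro sym l (⟨rfl, rfl⟩ | ⟨s, rfl, _, _, _⟩) <;> simp [pvPad]
  induction xs with
  | nil =>
    intro sym l j hst
    rw [show pvScan (k:Int) [] sym (l:Int) j = none from rfl]
    have : pvFirstWin (pvPad sym l ++ []) k = none := by
      rw [pvFirstWin_none_iff hk]
      intro i
      apply pvWinAt_short
      have hl : l < k := by
        rcases hst with ⟨_, rfl⟩ | ⟨s, _, _, _, hlk⟩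
        · omega
        · exact hlk
      simp [padlen sym l hst]
      omega
    rw [this]; rfl
  | cons cell rest ih =>
    intro sym l j hst
    by_cases hc2 : pvTruthy cell = true
    · by_cases he : (cell == sym) = true
      · -- run continues
        obtain ⟨s, rfl, hs, hl1, hlk⟩ : ∃ s, sym = some s ∧ pvTruthy (some s) = true ∧ 1 ≤ l ∧ l < k := by
          rcases hst with ⟨rfl, rfl⟩ | h
          · cases cell with
            | none => simp [pvTruthy] at hc2
            | some c => simp at he
          · exact h
        have hcell : cell = some s := by
          cases cell <;> simp_all
        subst hcell
        rw [pvScan_cons_cont hc2 he]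
        by_cases hlk1 : l + 1 = k
        · have hbeq : (((l:Int) + 1) == (k:Int)) = true := by rw [beq_iff_eq]; omega
          simp only [hbeq, if_true]
          have hpad : pvPad (some s) l = List.replicate (k-1) (some s) := by
            simp only [pvPad]; congr 1; omega
          rw [hpad]
          have hfw : pvFirstWin (List.replicate (k-1) (some s) ++ some s :: rest) k = some 0 :=
            pvFirstWin_first hk (pvWinAt_head_full hs hk rest) (fun j hj => by omega)
          rw [hfw]
          simp only [Option.map_some, Option.some.injEq]
          push_cast
          omega
        · have hbeq : (((l:Int) + 1) == (k:Int)) = false := by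
            rw [beq_eq_false_iff_ne]; intro hcon; omega
          simp only [hbeq, Bool.false_eq_true, if_false]
          have hih := ih (some s) (l+1) (j+1) (Or.inr ⟨s, rfl, hs, by omega, by omega⟩)
          push_cast at hih
          rw [hih]
          have hlist : pvPad (some s) (l+1) ++ rest = pvPad (some s) l ++ some s :: rest := by
            simp only [pvPad, List.replicate_succ', List.append_assoc, List.singleton_append]
          rw [hlist]
          apply pvOptionMap_congr
          intro a; push_cast; omega
      · -- new run of length 1
        obtain ⟨s', hcell⟩ : ∃ s', cell = some s' := by
          cases cell
          · simp [pvTruthy] at hc2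
          · exact ⟨_, rfl⟩
        subst hcell
        have he' : ((some s' : Option String) == sym) = false := by simpa using he
        rw [pvScan_cons_new hc2 he']
        by_cases hk1 : k = 1
        · subst hk1
          simp only [show ((1:Int) == ((1:Nat):Int)) = true by rw [beq_iff_eq]; norm_num, if_true]
          obtain ⟨rfl, rfl⟩ : sym = none ∧ l = 0 := by
            rcases hst with h | ⟨s, _, _, h1, hl⟩
            · exact h
            · omega
          have hfw : pvFirstWin (pvPad none 0 ++ some s' :: rest) 1 = some 0 := by
            apply pvFirstWin_first (by omega) _ (fun j hj => by omega)
            simp only [pvPad, List.nil_append, pvWinAt]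
            simp only [Bool.and_eq_true]
            refine ⟨⟨by simp, by simpa using hc2⟩, ?_⟩
            rw [List.all_eq_true]
            intro t ht
            have : t = 0 := by simpa using List.mem_range.1 ht
            subst this
            simp
          rw [hfw]
          simp
        · have hbeq : ((1:Int) == (k:Int)) = false := by
            rw [beq_eq_false_iff_ne]; intro hcon; omega
          simp only [hbeq, Bool.false_eq_true, if_false]
          have hih := ih (some s') 1 (j+1) (Or.inr ⟨s', rfl, by simpa [pvTruthy] using hc2, by omega, by omega⟩)
          push_cast at hih
          rw [hih]
          have hfalse : ∀ i, i < l → pvWinAt (pvPad sym l ++ some s' :: rest) k i = false := by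
            intro i hi
            rcases hst with ⟨rfl, rfl⟩ | ⟨s, rfl, hs, hl1, hlk⟩
            · omega
            · have hne : ((some s' : Option String) == some s) = false := he'
              exact pvWinAt_break hi hlk s (some s') rest hne
          have hshift := pvFirstWin_shift hk l (by simp [padlen sym l hst]) hfalse
          have hdrop : (pvPad sym l ++ some s' :: rest).drop l = some s' :: rest := by
            have h := List.drop_left (l₁ := pvPad sym l) (l₂ := some s' :: rest)
            rwa [padlen sym l hst] at h
          rw [hshift, hdrop, Option.map_map]
          simp only [pvPad]
          apply pvOptionMap_congr
          intro a; simp; push_cast; omega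
    · -- falsy cell: run resets
      have hc2' : pvTruthy cell = false := by simpa using hc2
      rw [pvScan_cons_reset hc2']
      have hbeq : ((0:Int) == (k:Int)) = false := by
        rw [beq_eq_false_iff_ne]; intro hcon; omega
      simp only [hbeq, Bool.false_eq_true, if_false]
      have hih := ih none 0 (j+1) (Or.inl ⟨rfl, rfl⟩)
      push_cast at hih
      rw [hih]
      have hfalse : ∀ i, i < l + 1 → pvWinAt (pvPad sym l ++ cell :: rest) k i = false := by
        intro i hi
        by_cases hil : i < l
        · rcases hst with ⟨rfl, rfl⟩ | ⟨s, rfl, hs, hl1, hlk⟩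
          · omega
          · exact pvWinAt_break hil hlk s cell rest (pvBeq_falsy_truthy hc2' hs)
        · have hil' : i = l := by omega
          rw [hil']
          have := pvWinAt_at_pad_len (k := k) (pvPad sym l) cell rest hc2'
          rwa [padlen sym l hst] at this
      have hshift := pvFirstWin_shift hk (l+1) (by simp [padlen sym l hst]) hfalse
      have hdrop : (pvPad sym l ++ cell :: rest).drop (l+1) = rest := by
        have h := List.drop_left (l₁ := pvPad sym l ++ [cell]) (l₂ := rest)
        rw [show (pvPad sym l ++ [cell]).length = l + 1 by simp [padlen sym l hst],
          List.append_assoc, List.singleton_append] at h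
        exact h
      rw [hshift, hdrop, Option.map_map]
      simp only [pvPad, List.nil_append]
      apply pvOptionMap_congr
      intro a; simp; push_cast; omega

theorem pvScan_run {k : Nat} (hk : 1 ≤ k) (xs : List (Option String)) (j : Int) :
    pvScan (k : Int) xs none 0 j
      = (pvFirstWin xs k).map (fun i : Nat => (i : Int) + k - 1 + j) := by
  have := pvScan_spec hk xs none 0 j (Or.inl ⟨rfl, rfl⟩)
  rw [show ((0:Nat):Int) = 0 by norm_num] at this
  rw [this]
  simp only [pvPad, List.nil_append]
  apply pvOptionMap_congr
  intro a; omega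

-- ===== left-biased minimum merge and the core argmin lemma =====
def pvMerge {β : Type} (rowOf : β → Int) : Option β → Option β → Option β
  | a, none => a
  | none, some b => some b
  | some a, some b => if rowOf b < rowOf a then some b else some a

theorem pvMerge_none_left {β : Type} (rowOf : β → Int) (x : Option β) :
    pvMerge rowOf none x = x := by cases x <;> rfl

theorem pvMerge_assoc {β : Type} (rowOf : β → Int) (a b c : Option β) :
    pvMerge rowOf (pvMerge rowOf a b) c = pvMerge rowOf a (pvMerge rowOf b c) := by
  cases a <;> cases b <;> cases c <;> simp only [pvMerge] <;> split_ifs <;>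
    simp only [pvMerge] <;> split_ifs <;> first | rfl | omega

theorem pvFoldMerge_hom {β τ : Type} (rowOf : β → Int) (cand : τ → Option β) :
    ∀ (ts : List τ) (acc : Option β),
    ts.foldl (fun a t => pvMerge rowOf a (cand t)) acc
      = pvMerge rowOf acc (ts.foldl (fun a t => pvMerge rowOf a (cand t)) none) := by
  intro ts
  induction ts with
  | nil => intro acc; cases acc <;> rfl
  | cons t ts ih =>
    intro acc
    simp only [List.foldl_cons]
    rw [ih (pvMerge rowOf acc (cand t)), ih (pvMerge rowOf none (cand t)),
      pvMerge_none_left, pvMerge_assoc]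

theorem pvCore {β : Type} (rs : List Int) (W : Int → Int → Bool) (out : Int → Int → β)
    (rowOf : β → Int) (wf : Int → Option Int)
    (hrs : rs.Pairwise (· < ·))
    (hout : ∀ r t, W r t = true → rowOf (out r t) = r) :
    ∀ (ts : List Int), (∀ t ∈ ts, wf t = rs.find? (fun r => W r t)) →
    rs.findSome? (fun r => ((ts.find? (fun t => W r t)).map (fun t => out r t)))
      = ts.foldl (fun a t => pvMerge rowOf a ((wf t).map (fun r => out r t))) none := by
  intro ts
  induction ts with
  | nil =>
    intro _
    simp only [List.find?_nil, Option.map_none, List.foldl_nil]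
    exact List.findSome?_eq_none_iff.2 (fun x _ => rfl)
  | cons t ts ih =>
    intro hwf
    have hwt : wf t = rs.find? (fun r => W r t) := hwf t (by simp)
    have ihe := ih (fun t' ht' => hwf t' (by simp [ht']))
    simp only [List.foldl_cons]
    rw [pvFoldMerge_hom, pvMerge_none_left, ← ihe]
    rcases h0 : wf t with _ | r0
    · -- no win on line t
      rw [hwt] at h0
      have hno : ∀ r ∈ rs, W r t = false := by
        intro r hr
        simpa using List.find?_eq_none.1 h0 r hr
      simp only [Option.map_none]
      have : ∀ r ∈ rs, ((t :: ts).find? (fun t' => W r t')).map (out r)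
          = (ts.find? (fun t' => W r t')).map (out r) := by
        intro r hr
        rw [List.find?_cons, hno r hr]
      rw [pvFindSome?_congr _ _ _ this]
      cases hrest : rs.findSome? (fun r => (ts.find? (fun t' => W r t')).map (out r)) <;> rfl
    · rw [hwt] at h0
      have hr0mem : r0 ∈ rs := List.mem_of_find?_eq_some h0
      have hr0W : W r0 t = true := by simpa using List.find?_some h0
      have hr0min : ∀ y ∈ rs, y < r0 → W y t = false := pvFind?_min _ _ _ hrs h0
      simp only [Option.map_some]
      rcases hrest : rs.findSome? (fun r => (ts.find? (fun t' => W r t')).map (out r)) with _ | bl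
      · -- no win on the remaining lines
        have hnone : ∀ r ∈ rs, (ts.find? (fun t' => W r t')).map (out r) = none :=
          List.findSome?_eq_none_iff.1 hrest
        have : rs.findSome? (fun r => ((t :: ts).find? (fun t' => W r t')).map (out r))
            = some (out r0 t) := by
          apply pvFindSome?_first _ _ r0 _ hrs hr0mem
          · rw [List.find?_cons, hr0W]; rfl
          · intro y hy hlt
            rw [List.find?_cons, hr0min y hy hlt]
            exact hnone y hy
        rw [this]; rfl
      · obtain ⟨r1, hr1mem, hr1v, hr1min⟩ := pvFindSome?_char _ _ _ hrs hrest
        obtain ⟨t1, ht1, hblv⟩ : ∃ t1, ts.find? (fun t' => W r1 t') = some t1 ∧ bl = out r1 t1 := by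
          rcases hf : ts.find? (fun t' => W r1 t') with _ | t1
          · rw [hf] at hr1v; simp at hr1v
          · rw [hf] at hr1v; simp at hr1v; exact ⟨t1, rfl, hr1v.symm⟩
        have hrowbl : rowOf bl = r1 := by rw [hblv]; exact hout r1 t1 (by simpa using List.find?_some ht1)
        have hrow0 : rowOf (out r0 t) = r0 := hout r0 t hr0W
        by_cases hlt : r1 < r0
        · have : rs.findSome? (fun r => ((t :: ts).find? (fun t' => W r t')).map (out r))
              = some bl := by
            apply pvFindSome?_first _ _ r1 _ hrs hr1mem
            · rw [List.find?_cons]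
              have : W r1 t = false := by
                rcases hW : W r1 t with _ | _
                · rfl
                · exact absurd hlt (not_lt.2 (by
                    by_contra hcon
                    push_neg at hcon
                    exact absurd (hr0min r1 hr1mem (by omega)) (by simp [hW])))
              rw [this]
              exact hr1v
            · intro y hy hlty
              rw [List.find?_cons, hr0min y hy (by omega)]
              exact hr1min y hy hlty
          rw [this]
          simp only [pvMerge, hrowbl, hrow0]
          rw [if_pos hlt]
        · have : rs.findSome? (fun r => ((t :: ts).find? (fun t' => W r t')).map (out r))
              = some (out r0 t) := by
            apply pvFindSome?_first _ _ r0 _ hrs hr0mem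
            · rw [List.find?_cons, hr0W]; rfl
            · intro y hy hlty
              rw [List.find?_cons, hr0min y hy hlty]
              exact hr1min y hy (by omega)
          rw [this]
          simp only [pvMerge, hrowbl, hrow0]
          rw [if_neg hlt]

-- ===== bridging pyRange-based lines with pvWinAt =====
theorem pvRange_shift (r len : Int) :
    PySem.List.pyRange r (r + len) 1 = (PySem.List.pyRange 0 len 1).map (fun i => r + i) := by
  rw [PySem.List.pyRange_one, PySem.List.pyRange_one, List.map_map]
  rw [show r + len - r = len by ring, show len - 0 = len by ring]
  apply List.map_congr_left
  intro t _
  simp [Function.comp]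

theorem pvRange_drop (a b : Int) (n : Nat) (hn : (n:Int) ≤ b - a) :
    (PySem.List.pyRange a b 1).drop n = PySem.List.pyRange (a + n) b 1 := by
  rw [PySem.List.pyRange_one_append a (a + n) b (by omega) (by omega)]
  have h := List.drop_left (l₁ := PySem.List.pyRange a (a+n) 1) (l₂ := PySem.List.pyRange (a+n) b 1)
  rwa [PySem.List.length_pyRange_one, show a + n - a = (n:Int) by ring, Int.toNat_natCast] at h

theorem pvRange_take (a b : Int) (n : Nat) (hn : (n:Int) ≤ b - a) :
    (PySem.List.pyRange a b 1).take n = PySem.List.pyRange a (a + n) 1 := by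
  rw [PySem.List.pyRange_one_append a (a + n) b (by omega) (by omega)]
  have h := List.take_left (l₁ := PySem.List.pyRange a (a+n) 1) (l₂ := PySem.List.pyRange (a+n) b 1)
  rwa [PySem.List.length_pyRange_one, show a + n - a = (n:Int) by ring, Int.toNat_natCast] at h

theorem pvSlice_map {α β : Type} (xs : List α) (f : α → β) (a b : Int) (h0a : 0 ≤ a) (h0b : 0 ≤ b) :
    PySem.List.slice (xs.map f) (some a) (some b) = (PySem.List.slice xs (some a) (some b)).map f := by
  rw [PySem.List.slice_toNat _ h0a h0b, PySem.List.slice_toNat _ h0a h0b, List.map_take, List.map_drop]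

theorem pvCellsGetD (g : Int → Option String) (a b : Int) (t : Nat) (ht : (t:Int) < b - a) :
    ((PySem.List.pyRange a b 1).map g).getD t none = g (a + t) := by
  rw [List.getD_eq_getElem?_getD, List.getElem?_map, PySem.List.getElem?_pyRange_one,
    if_pos (by omega)]
  rfl

theorem pvWinAt_cells (g : Int → Option String) (a b : Int) (k i : Nat) (hk : 1 ≤ k)
    (hik : (i:Int) + k ≤ b - a) :
    pvWinAt ((PySem.List.pyRange a b 1).map g) k i
      = (pvTruthy (g (a + i)) && (List.range k).all (fun t => g (a + i + t) == g (a + i))) := by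
  unfold pvWinAt
  rw [List.length_map, PySem.List.length_pyRange_one]
  rw [pvCellsGetD g a b i (by omega)]
  have hd : decide (i + k ≤ (b - a).toNat) = true := by simp; omega
  rw [hd, Bool.true_and]
  congr 1
  apply pvAll_congr
  intro t hmem
  have ht : t < k := List.mem_range.1 hmem
  rw [pvCellsGetD g a b (i + t) (by push_cast; omega)]
  have hc : a + ((i + t : Nat) : Int) = a + i + t := by push_cast; ring
  rw [hc]

-- cond in normal form (shared by the A-side window test and the B-side run test)
def pvCond (f : Int → Int → Option String) (dc : Int) (k : Nat) (r c : Int) : Bool :=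
  pvTruthy (f r c) && (List.range k).all (fun t => f (r + t) (c + dc * t) == f r c)

theorem pvAcond_eq (f : Int → Int → Option String) (dc : Int) (k : Nat) (r c : Int) :
    (pvTruthy (f r c) && (PySem.List.pyRange 0 (k:Int) 1).all (fun i => f (r+i) (c + dc*i) == f r c))
      = pvCond f dc k r c := by
  unfold pvCond
  congr 1
  rw [PySem.List.pyRange_one, List.all_map, show (k:Int) - 0 = (k:Int) by ring, Int.toNat_natCast]
  apply pvAll_congr
  intro t _
  simp [Function.comp]

-- the per-direction data
def pvCellsOf (f : Int → Int → Option String) (dc : Int) (lo hi : Int → Int) (d : Int) :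
    List (Option String) :=
  (PySem.List.pyRange (lo d) (hi d) 1).map (fun ρ => f ρ (d + dc*ρ))

def pvWOf (f : Int → Int → Option String) (dc : Int) (k : Nat) (lo hi : Int → Int) (r d : Int) : Bool :=
  decide (lo d ≤ r) && pvWinAt (pvCellsOf f dc lo hi d) k (r - lo d).toNat

def pvOutOf (dc : Int) (k : Nat) (r d : Int) : List (Int × Int) :=
  (PySem.List.pyRange r (r + (k:Int)) 1).map (fun ρ => (ρ, d + dc*ρ))

def pvRowOf (b : List (Int × Int)) : Int := (PySem.List.pyGetD b 0 ((0:Int),(0:Int))).1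

def pvWfOf (f : Int → Int → Option String) (dc : Int) (k : Nat) (lo hi : Int → Int) (d : Int) : Option Int :=
  (pvFirstWin (pvCellsOf f dc lo hi d) k).map (fun i : Nat => lo d + (i:Int))

def pvDict (b : List (Int × Int)) : List (List (String × Int)) :=
  b.map (fun rc => [("x", rc.1), ("y", rc.2)])

theorem pvOut_row (dc : Int) (k : Nat) (hk : 1 ≤ k) (r d : Int) : pvRowOf (pvOutOf dc k r d) = r := by
  unfold pvRowOf pvOutOf
  rw [PySem.List.pyRange_one_cons (by omega)]
  simp [PySem.List.pyGetD_zero]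

theorem pvW_eq (f : Int → Int → Option String) (dc : Int) (k : Nat) (hk : 1 ≤ k) (lo hi : Int → Int) (r d : Int)
    (h1 : lo d ≤ r) (h2 : r + (k:Int) ≤ hi d) :
    pvWOf f dc k lo hi r d = pvCond f dc k r (d + dc*r) := by
  unfold pvWOf pvCellsOf pvCond
  rw [decide_eq_true h1, Bool.true_and]
  rw [pvWinAt_cells _ _ _ _ _ hk (by push_cast; omega)]
  rw [show lo d + ((r - lo d).toNat : Int) = r by omega]
  congr 1
  apply pvAll_congr
  intro t _
  rw [show d + dc * (r + t) = d + dc * r + dc * t by ring]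

theorem pvW_false (f : Int → Int → Option String) (dc : Int) (k : Nat) (hk : 1 ≤ k) (lo hi : Int → Int) (r d : Int)
    (h : ¬ (lo d ≤ r ∧ r + (k:Int) ≤ hi d)) : pvWOf f dc k lo hi r d = false := by
  unfold pvWOf
  by_cases h1 : lo d ≤ r
  · have h2 : hi d < r + (k:Int) := by push_neg at h; have := h h1; omega
    rw [pvWinAt_short (by
      unfold pvCellsOf
      rw [List.length_map, PySem.List.length_pyRange_one]
      omega)]
    simp
  · rw [decide_eq_false h1]
    simp

-- wf is the least winning row of its line, as a find? over A's outer range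
theorem pvWf_spec (f : Int → Int → Option String) (dc : Int) (R k : Nat) (hk : 1 ≤ k)
    (lo hi : Int → Int) (d : Int) (hlo : ∀ r : Int, lo d ≤ r → r < hi d → 0 ≤ r ∧ r < (R:Int)) :
    pvWfOf f dc k lo hi d
      = (PySem.List.pyRange 0 ((R:Int) - (k:Int) + 1) 1).find? (fun r => pvWOf f dc k lo hi r d) := by
  unfold pvWfOf
  have hlen : (pvCellsOf f dc lo hi d).length = (hi d - lo d).toNat := by
    unfold pvCellsOf; rw [List.length_map, PySem.List.length_pyRange_one]
  rcases h0 : pvFirstWin (pvCellsOf f dc lo hi d) k with _ | i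
  · simp only [Option.map_none]
    symm
    rw [List.find?_eq_none]
    intro r hr
    simp only [Bool.not_eq_true]
    by_cases hw : lo d ≤ r ∧ r + (k:Int) ≤ hi d
    · unfold pvWOf
      rw [(pvFirstWin_none_iff hk).1 h0]
      simp
    · exact pvW_false f dc k hk lo hi r d hw
  · obtain ⟨hw, hmin⟩ := pvFirstWin_some h0
    have hik : i + k ≤ (hi d - lo d).toNat := by
      by_contra hcon
      rw [pvWinAt_short (by omega)] at hw
      simp at hw
    have hbounds : 0 ≤ lo d ∧ hi d ≤ (R:Int) := by
      have h1 := hlo (lo d) (le_refl _) (by omega)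
      have h2 := hlo (hi d - 1) (by omega) (by omega)
      omega
    symm
    simp only [Option.map_some]
    apply pvFind?_first _ _ _ (PySem.List.pairwise_lt_pyRange_one _ _)
      (PySem.List.mem_pyRange_one.2 (by constructor <;> omega))
    · unfold pvWOf
      rw [decide_eq_true (by omega : lo d ≤ lo d + (i:Int)), Bool.true_and,
        show ((lo d + (i:Int)) - lo d).toNat = i by omega]
      exact hw
    · intro y hy hlt
      have hy' := PySem.List.mem_pyRange_one.1 hy
      by_cases hylo : lo d ≤ y
      · have : (y - lo d).toNat < i := by omega
        unfold pvWOf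
        rw [hmin _ this]
        simp
      · exact pvW_false f dc k hk lo hi y d (by omega)

theorem pvWinAt_le_len {xs : List (Option String)} {k i : Nat} (h : pvWinAt xs k i = true) :
    i + k ≤ xs.length := by
  unfold pvWinAt at h
  simp only [Bool.and_eq_true, decide_eq_true_eq] at h
  exact h.1.1

theorem pvAout_eq (dc : Int) (k : Nat) (r d : Int) :
    (PySem.List.pyRange 0 (k:Int) 1).map (fun i => [("x", r+i), ("y", (d + dc*r) + dc*i)])
      = pvDict (pvOutOf dc k r d) := by
  unfold pvDict pvOutOf
  rw [pvRange_shift r (k:Int), List.map_map, List.map_map]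
  apply List.map_congr_left
  intro i _
  simp only [Function.comp]
  refine congrArg₂ _ rfl (congrArg₂ _ ?_ rfl)
  refine congrArg _ ?_
  ring

theorem pvGlue (fA fB : Int → Int → Option String) (R C k : Nat) (hk : 1 ≤ k)
    (dc clo chi tlo thi : Int) (lo hi : Int → Int)
    (hf : ∀ r c : Int, 0 ≤ r → r < (R:Int) → 0 ≤ c → c < (C:Int) → fB r c = fA r c)
    (hlh : ∀ d, tlo ≤ d → d < thi →
      ∀ r : Int, (lo d ≤ r ∧ r < hi d) ↔ (0 ≤ r ∧ r < (R:Int) ∧ 0 ≤ d + dc*r ∧ d + dc*r < (C:Int)))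
    (hcc : ∀ c : Int, (clo ≤ c ∧ c < chi) ↔
      (0 ≤ c ∧ c < (C:Int) ∧ 0 ≤ c + dc*((k:Int)-1) ∧ c + dc*((k:Int)-1) < (C:Int)))
    (htt : ∀ r c : Int, 0 ≤ r → r < (R:Int) → 0 ≤ c → c < (C:Int) →
      tlo ≤ c - dc*r ∧ c - dc*r < thi)
    (hdc : dc = 0 ∨ dc = 1 ∨ dc = -1) :
    (PySem.List.pyRange 0 ((R:Int) - (k:Int) + 1) 1).findSome? (fun r =>
      (PySem.List.pyRange clo chi 1).findSome? (fun c =>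
        if pvTruthy (fA r c) && (PySem.List.pyRange 0 (k:Int) 1).all (fun i => fA (r+i) (c + dc*i) == fA r c)
        then some ((PySem.List.pyRange 0 (k:Int) 1).map (fun i => [("x", r+i), ("y", c + dc*i)]))
        else none))
    = ((PySem.List.pyRange tlo thi 1).foldl (fun best d =>
        match pvScan (k:Int) ((PySem.List.pyRange (lo d) (hi d) 1).map (fun ρ => fB ρ (d + dc*ρ))) none 0 0 with
        | none => best
        | some j =>
          let seg := PySem.List.slice ((PySem.List.pyRange (lo d) (hi d) 1).map (fun ρ => (ρ, d + dc*ρ)))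
            (some (j - (k:Int) + 1)) (some (j + 1))
          match best with
          | none => some seg
          | some b => if (PySem.List.pyGetD seg 0 ((0:Int),(0:Int))).1 < (PySem.List.pyGetD b 0 ((0:Int),(0:Int))).1
            then some seg else some b) none).map pvDict := by
  -- convexity of the column bounds along a window
  have hconv : ∀ c : Int, clo ≤ c → c < chi → ∀ t : Nat, t < k →
      0 ≤ c + dc*(t:Int) ∧ c + dc*(t:Int) < (C:Int) := by
    intro c h1 h2 t ht
    have h3 := (hcc c).1 ⟨h1, h2⟩
    have hkk : (1:Int) ≤ (k:Int) := by exact_mod_cast hk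
    have htt' : (t:Int) ≤ (k:Int) - 1 := by
      have : (t:Int) < (k:Int) := by exact_mod_cast ht
      omega
    have ht0 : (0:Int) ≤ (t:Int) := by positivity
    rcases hdc with rfl | rfl | rfl
    · simp only [zero_mul, add_zero] at h3 ⊢; omega
    · simp only [one_mul] at h3 ⊢; omega
    · simp only [neg_one_mul] at h3 ⊢; omega
  -- the B-side cells agree with the A-side accessor on every listed line
  have hcellsEq : ∀ d, tlo ≤ d → d < thi →
      (PySem.List.pyRange (lo d) (hi d) 1).map (fun ρ => fB ρ (d + dc*ρ)) = pvCellsOf fA dc lo hi d := by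
    intro d h1 h2
    unfold pvCellsOf
    apply List.map_congr_left
    intro ρ hρ
    have hb := PySem.List.mem_pyRange_one.1 hρ
    have h3 := (hlh d h1 h2 ρ).1 ⟨hb.1, hb.2⟩
    exact hf ρ _ h3.1 h3.2.1 h3.2.2.1 h3.2.2.2
  -- W true forces the A-side column to lie in A's scan range
  have hWts : ∀ r d : Int, tlo ≤ d → d < thi → pvWOf fA dc k lo hi r d = true →
      (clo ≤ d + dc*r ∧ d + dc*r < chi) := by
    intro r d h1 h2 hW
    unfold pvWOf at hW
    simp only [Bool.and_eq_true, decide_eq_true_eq] at hW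
    obtain ⟨hlor, hwin⟩ := hW
    have hlen := pvWinAt_le_len hwin
    rw [show (pvCellsOf fA dc lo hi d).length = (hi d - lo d).toNat by
      unfold pvCellsOf; rw [List.length_map, PySem.List.length_pyRange_one]] at hlen
    have hrk : r + (k:Int) ≤ hi d := by omega
    have hr0 := (hlh d h1 h2 r).1 ⟨hlor, by omega⟩
    have hr1 := (hlh d h1 h2 (r + (k:Int) - 1)).1 ⟨by omega, by omega⟩
    refine (hcc (d + dc*r)).2 ⟨hr0.2.2.1, hr0.2.2.2, ?_, ?_⟩
    · have := hr1.2.2.1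
      calc (0:Int) ≤ d + dc*(r + (k:Int) - 1) := this
        _ = d + dc*r + dc*((k:Int)-1) := by ring
    · have := hr1.2.2.2
      calc d + dc*r + dc*((k:Int)-1) = d + dc*(r + (k:Int) - 1) := by ring
        _ < (C:Int) := this
  -- the guard at (r, c) is the line predicate at (r, c - dc*r)
  have hcond : ∀ r c : Int, 0 ≤ r → r + (k:Int) ≤ (R:Int) → clo ≤ c → c < chi →
      pvCond fA dc k r c = pvWOf fA dc k lo hi r (c - dc*r) := by
    intro r c hr0 hrk h1 h2
    have hc := (hcc c).1 ⟨h1, h2⟩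
    have hts := htt r c hr0 (by omega) hc.1 hc.2.1
    have hrows : ∀ t : Nat, t < k → lo (c - dc*r) ≤ r + (t:Int) ∧ r + (t:Int) < hi (c - dc*r) := by
      intro t ht
      apply (hlh (c - dc*r) hts.1 hts.2 (r + (t:Int))).2
      have hcol := hconv c h1 h2 t ht
      have htk : (t:Int) < (k:Int) := by exact_mod_cast ht
      have ht0 : (0:Int) ≤ (t:Int) := by positivity
      refine ⟨by omega, by omega, ?_, ?_⟩
      · calc (0:Int) ≤ c + dc*(t:Int) := hcol.1
          _ = c - dc*r + dc*(r + (t:Int)) := by ring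
      · calc c - dc*r + dc*(r + (t:Int)) = c + dc*(t:Int) := by ring
          _ < (C:Int) := hcol.2
    have h00 := hrows 0 (by omega)
    have hk1 := hrows (k-1) (by omega)
    have hlo' : lo (c - dc*r) ≤ r := by simpa using h00.1
    have hhi' : r + (k:Int) ≤ hi (c - dc*r) := by
      have := hk1.2
      have hcast : ((k - 1 : Nat) : Int) = (k:Int) - 1 := by omega
      rw [hcast] at this
      omega
    rw [pvW_eq fA dc k hk lo hi r (c - dc*r) hlo' hhi']
    rw [show c - dc*r + dc*r = c by ring]
  -- the B-side fold step in merge form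
  have hstep : ∀ (best : Option (List (Int × Int))) (d : Int), d ∈ PySem.List.pyRange tlo thi 1 →
      (match pvScan (k:Int) ((PySem.List.pyRange (lo d) (hi d) 1).map (fun ρ => fB ρ (d + dc*ρ))) none 0 0 with
        | none => best
        | some j =>
          let seg := PySem.List.slice ((PySem.List.pyRange (lo d) (hi d) 1).map (fun ρ => (ρ, d + dc*ρ)))
            (some (j - (k:Int) + 1)) (some (j + 1))
          match best with
          | none => some seg
          | some b => if (PySem.List.pyGetD seg 0 ((0:Int),(0:Int))).1 < (PySem.List.pyGetD b 0 ((0:Int),(0:Int))).1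
            then some seg else some b)
      = pvMerge pvRowOf best ((pvWfOf fA dc k lo hi d).map (fun r => pvOutOf dc k r d)) := by
    intro best d hd
    have hdb := PySem.List.mem_pyRange_one.1 hd
    rw [hcellsEq d hdb.1 hdb.2, pvScan_run hk]
    rcases hfw : pvFirstWin (pvCellsOf fA dc lo hi d) k with _ | i
    · unfold pvWfOf
      rw [hfw]
      cases best <;> rfl
    · obtain ⟨hw, _⟩ := pvFirstWin_some hfw
      have hik : i + k ≤ (hi d - lo d).toNat := by
        have := pvWinAt_le_len hw
        rwa [show (pvCellsOf fA dc lo hi d).length = (hi d - lo d).toNat by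
          unfold pvCellsOf; rw [List.length_map, PySem.List.length_pyRange_one]] at this
      unfold pvWfOf
      rw [hfw]
      simp only [Option.map_some]
      have hseg : PySem.List.slice ((PySem.List.pyRange (lo d) (hi d) 1).map (fun ρ => (ρ, d + dc*ρ)))
          (some ((i:Int) + (k:Int) - 1 + 0 - (k:Int) + 1)) (some ((i:Int) + (k:Int) - 1 + 0 + 1))
          = pvOutOf dc k (lo d + (i:Int)) d := by
        rw [show (i:Int) + (k:Int) - 1 + 0 - (k:Int) + 1 = (i:Int) by ring,
          show (i:Int) + (k:Int) - 1 + 0 + 1 = (i:Int) + (k:Int) by ring]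
        rw [pvSlice_map _ _ _ _ (by positivity) (by positivity)]
        rw [PySem.List.slice_toNat _ (by positivity) (by positivity)]
        rw [show ((i:Int) + (k:Int)).toNat = i + k by omega, Int.toNat_natCast]
        rw [pvRange_drop _ _ _ (by omega), show i + k - i = k by omega,
          pvRange_take _ _ _ (by omega)]
        unfold pvOutOf
        rw [show lo d + (i:Int) + (k:Int) = lo d + ↑i + ↑k by ring]
      rw [hseg]
      have hrow := pvOut_row dc k hk (lo d + (i:Int)) d
      cases best with
      | none => rfl
      | some b =>
        simp only [pvMerge]
        rw [show pvRowOf (pvOutOf dc k (lo d + (i:Int)) d)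
            = (PySem.List.pyGetD (pvOutOf dc k (lo d + (i:Int)) d) 0 ((0:Int),(0:Int))).1 from rfl,
          show pvRowOf b = (PySem.List.pyGetD b 0 ((0:Int),(0:Int))).1 from rfl]
  -- the A-side inner loop in find? form
  have hinner : ∀ r : Int, r ∈ PySem.List.pyRange 0 ((R:Int) - (k:Int) + 1) 1 →
      (PySem.List.pyRange clo chi 1).findSome? (fun c =>
        if pvTruthy (fA r c) && (PySem.List.pyRange 0 (k:Int) 1).all (fun i => fA (r+i) (c + dc*i) == fA r c)
        then some ((PySem.List.pyRange 0 (k:Int) 1).map (fun i => [("x", r+i), ("y", c + dc*i)]))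
        else none)
      = (((PySem.List.pyRange tlo thi 1).find? (fun d => pvWOf fA dc k lo hi r d)).map
          (fun d => pvOutOf dc k r d)).map pvDict := by
    intro r hr
    have hrb := PySem.List.mem_pyRange_one.1 hr
    rw [pvFindSome?_congr _ _ (fun c =>
        if pvCond fA dc k r c
        then some ((PySem.List.pyRange 0 (k:Int) 1).map (fun i => [("x", r+i), ("y", c + dc*i)]))
        else none) (by intro c _; rw [pvAcond_eq])]
    rw [pvFindSome?_guard]
    rcases hA : (PySem.List.pyRange clo chi 1).find? (pvCond fA dc k r) with _ | c
    · rcases hD : (PySem.List.pyRange tlo thi 1).find? (fun d => pvWOf fA dc k lo hi r d) with _ | d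
      · rfl
      · exfalso
        have hdmem := PySem.List.mem_pyRange_one.1 (List.mem_of_find?_eq_some hD)
        have hdW : pvWOf fA dc k lo hi r d = true := by simpa using List.find?_some hD
        have hcb := hWts r d hdmem.1 hdmem.2 hdW
        have := List.find?_eq_none.1 hA (d + dc*r) (PySem.List.mem_pyRange_one.2 ⟨hcb.1, hcb.2⟩)
        rw [hcond r (d + dc*r) (by omega) (by omega) hcb.1 hcb.2] at this
        rw [show d + dc*r - dc*r = d by ring] at this
        exact this (by simpa using hdW)
    · have hcmem := PySem.List.mem_pyRange_one.1 (List.mem_of_find?_eq_some hA)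
      have hcA : pvCond fA dc k r c = true := by simpa using List.find?_some hA
      have hcW : pvWOf fA dc k lo hi r (c - dc*r) = true := by
        rw [← hcond r c (by omega) (by omega) hcmem.1 hcmem.2]; exact hcA
      have hcC := (hcc c).1 ⟨hcmem.1, hcmem.2⟩
      have hdts := htt r c (by omega) (by omega) hcC.1 hcC.2.1
      rcases hD : (PySem.List.pyRange tlo thi 1).find? (fun d => pvWOf fA dc k lo hi r d) with _ | d
      · exfalso
        have := List.find?_eq_none.1 hD (c - dc*r) (PySem.List.mem_pyRange_one.2 ⟨hdts.1, hdts.2⟩)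
        exact this (by simpa using hcW)
      · have hdmem := PySem.List.mem_pyRange_one.1 (List.mem_of_find?_eq_some hD)
        have hdW : pvWOf fA dc k lo hi r d = true := by simpa using List.find?_some hD
        have hcb := hWts r d hdmem.1 hdmem.2 hdW
        -- minimality in both directions gives c = d + dc*r
        have h1 : ¬ (d + dc*r < c) := by
          intro hlt
          have := pvFind?_min _ _ _ (PySem.List.pairwise_lt_pyRange_one _ _) hA (d + dc*r)
            (PySem.List.mem_pyRange_one.2 ⟨hcb.1, hcb.2⟩) hlt
          rw [hcond r (d + dc*r) (by omega) (by omega) hcb.1 hcb.2,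
            show d + dc*r - dc*r = d by ring] at this
          rw [hdW] at this
          simp at this
        have h2 : ¬ (c - dc*r < d) := by
          intro hlt
          have := pvFind?_min _ _ _ (PySem.List.pairwise_lt_pyRange_one _ _) hD (c - dc*r)
            (PySem.List.mem_pyRange_one.2 ⟨hdts.1, hdts.2⟩) hlt
          rw [hcW] at this
          simp at this
        have hceq : c = d + dc*r := by omega
        simp only [Option.map_some]
        rw [hceq, pvAout_eq]
  -- assemble
  rw [pvFindSome?_congr _ _ _ hinner]
  rw [pvFindSome?_map]
  rw [pvCore _ _ _ _ _ (PySem.List.pairwise_lt_pyRange_one _ _)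
    (fun r t _ => pvOut_row dc k hk r t) _
    (fun d hd => pvWf_spec fA dc R k hk lo hi d (fun r h1 h2 => by
      have hdb := PySem.List.mem_pyRange_one.1 hd
      have := (hlh d hdb.1 hdb.2 r).1 ⟨h1, h2⟩
      exact ⟨this.1, this.2.1⟩))]
  rw [PySem.List.foldl_congr_mem _ _ _ _ (fun best d hd => hstep best d hd)]

theorem pvHoriz (fA : Int → Int → Option String) (C k : Nat) (hk : 1 ≤ k) (r : Int)
    (row : List (Option String)) (hlen : row.length = C)
    (hrow : ∀ i : Nat, i < C → row.getD i none = fA r (i:Int)) :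
    (PySem.List.pyRange 0 ((C:Int) - (k:Int) + 1) 1).findSome? (fun c =>
      if pvTruthy (fA r c) && (PySem.List.pyRange 0 (k:Int) 1).all (fun i => fA r (c+i) == fA r c)
      then some ((PySem.List.pyRange 0 (k:Int) 1).map (fun i => [("x", r), ("y", c+i)]))
      else none)
    = match pvScan (k:Int) row none 0 0 with
      | none => none
      | some j => some ((PySem.List.pyRange 0 (k:Int) 1).map (fun i => [("x", r), ("y", j - (k:Int) + 1 + i)])) := by
  have hcnd : ∀ c : Int, 0 ≤ c → c + (k:Int) ≤ (C:Int) →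
      (pvTruthy (fA r c) && (PySem.List.pyRange 0 (k:Int) 1).all (fun i => fA r (c+i) == fA r c))
        = pvWinAt row k c.toNat := by
    intro c h0 h1
    unfold pvWinAt
    have hg : ∀ t : Nat, (t:Int) < (C:Int) - c → row.getD (c.toNat + t) none = fA r (c + (t:Int)) := by
      intro t ht
      rw [hrow (c.toNat + t) (by omega)]
      congr 1
      push_cast
      omega
    rw [hlen]
    have hd : decide (c.toNat + k ≤ C) = true := by simp; omega
    rw [hd, Bool.true_and]
    have hg0 : row.getD c.toNat none = fA r c := by
      have := hg 0 (by omega)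
      simpa using this
    rw [hg0]
    congr 1
    rw [PySem.List.pyRange_one, List.all_map,
      show (k:Int) - 0 = (k:Int) by ring, Int.toNat_natCast]
    apply pvAll_congr
    intro t hmem
    have ht : t < k := List.mem_range.1 hmem
    simp only [Function.comp]
    rw [hg t (by push_cast; omega), show (0:Int) + (t:Int) = (t:Int) by ring]
  rw [pvScan_run hk]
  rcases hfw : pvFirstWin row k with _ | i
  · simp only [Option.map_none]
    apply List.findSome?_eq_none_iff.2
    intro c hc
    have hcb := PySem.List.mem_pyRange_one.1 hc
    rw [hcnd c (by omega) (by omega), (pvFirstWin_none_iff hk).1 hfw c.toNat]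
    rfl
  · obtain ⟨hw, hmin⟩ := pvFirstWin_some hfw
    have hik : i + k ≤ C := by
      have := pvWinAt_le_len hw
      omega
    simp only [Option.map_some]
    apply pvFindSome?_first _ _ ((i:Int)) _ (PySem.List.pairwise_lt_pyRange_one _ _)
      (PySem.List.mem_pyRange_one.2 ⟨by positivity, by omega⟩)
    · rw [hcnd (i:Int) (by positivity) (by omega), Int.toNat_natCast, hw, if_pos rfl]
      refine congrArg _ (List.map_congr_left ?_)
      intro t _
      refine congrArg₂ _ rfl (congrArg₂ _ (congrArg _ ?_) rfl)
      ring
    · intro y hy hlt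
      have hyb := PySem.List.mem_pyRange_one.1 hy
      rw [hcnd y (by omega) (by omega), hmin y.toNat (by omega)]
      rfl

theorem pvColsNorm (board : List (List (Option String))) :
    (if ((board.length : Int)) > 0 then (((board.headD []).length : Int)) else 0)
      = (((board.headD []).length : Nat) : Int) := by
  cases board with
  | nil => simp
  | cons h t => simp

theorem pvCell_grid (board : List (List (Option String))) (C : Nat)
    (r c : Int) (h0 : 0 ≤ r) (hr : r < (board.length:Int)) (h0c : 0 ≤ c) (hc : c < (C:Int)) :
    pvCell (board.map (fun row => PySem.List.slice row none (some (C:Int))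
      ++ List.replicate (((C:Int) - (row.length:Int)).toNat) (none : Option String))) r c
      = pvCell board r c := by
  unfold pvCell
  rw [PySem.List.pyGet?_of_nonneg _ h0, PySem.List.pyGet?_of_nonneg _ h0, List.getElem?_map]
  cases hrow : board[r.toNat]? with
  | none => rfl
  | some row =>
    simp only [Option.map_some]
    rw [PySem.List.slice_to_natCast]
    rw [PySem.List.pyGet?_of_nonneg _ h0c, PySem.List.pyGet?_of_nonneg _ h0c]
    by_cases hlen : c.toNat < row.length
    · rw [List.getElem?_append_left (by rw [List.length_take]; omega),
        List.getElem?_take_of_lt (by omega)]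
    · rw [List.getElem?_append_right (by rw [List.length_take]; omega),
        List.getElem?_replicate_of_lt (by rw [List.length_take]; omega),
        List.getElem?_eq_none (l := row) (by omega)]
      rfl

theorem pvGridRow (board : List (List (Option String))) (C : Nat)
    (r : Int) (h0 : 0 ≤ r) (hr : r < (board.length:Int)) :
    ((PySem.List.pyGet? (board.map (fun row => PySem.List.slice row none (some (C:Int))
        ++ List.replicate (((C:Int) - (row.length:Int)).toNat) (none : Option String))) r).getD []).length = C
    ∧ ∀ i : Nat, i < C →
      ((PySem.List.pyGet? (board.map (fun row => PySem.List.slice row none (some (C:Int))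
        ++ List.replicate (((C:Int) - (row.length:Int)).toNat) (none : Option String))) r).getD []).getD i none
        = pvCell board r (i:Int) := by
  rw [PySem.List.pyGet?_of_nonneg _ h0, List.getElem?_map]
  have hlt : r.toNat < board.length := by omega
  have hrow : board[r.toNat]? = some board[r.toNat] := List.getElem?_eq_getElem hlt
  rw [hrow]
  simp only [Option.map_some, Option.getD_some]
  rw [PySem.List.slice_to_natCast]
  constructor
  · rw [List.length_append, List.length_take, List.length_replicate]
    omega
  · intro i hi
    rw [List.getD_eq_getElem?_getD]
    unfold pvCell
    rw [PySem.List.pyGet?_of_nonneg _ h0, hrow]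
    by_cases hlen : i < board[r.toNat].length
    · rw [List.getElem?_append_left (by rw [List.length_take]; omega),
        List.getElem?_take_of_lt hi]
      simp
    · rw [List.getElem?_append_right (by rw [List.length_take]; omega),
        List.getElem?_replicate_of_lt (by rw [List.length_take]; omega)]
      simp [PySem.List.pyGet?_natCast,
        List.getElem?_eq_none (l := board[r.toNat]) (show board[r.toNat].length ≤ i by omega)]

theorem pvBestLine_eq (g : List (List (Option String))) (kI : Int) (lines : List (List (Int × Int))) :
    pvBestLine g kI lines = (lines.foldl (fun best coords =>
      match pvScan kI (coords.map (fun rc => pvCell g rc.1 rc.2)) none 0 0 with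
      | none => best
      | some j =>
        let seg := PySem.List.slice coords (some (j - kI + 1)) (some (j + 1))
        match best with
        | none => some seg
        | some b => if (PySem.List.pyGetD seg 0 ((0:Int),(0:Int))).1 < (PySem.List.pyGetD b 0 ((0:Int),(0:Int))).1
          then some seg else some b) none).map pvDict := by
  unfold pvBestLine
  rcases hfold : (lines.foldl (fun best coords =>
      match pvScan kI (coords.map (fun rc => pvCell g rc.1 rc.2)) none 0 0 with
      | none => best
      | some j =>
        let seg := PySem.List.slice coords (some (j - kI + 1)) (some (j + 1))
        match best with
        | none => some seg
        | some b => if (PySem.List.pyGetD seg 0 ((0:Int),(0:Int))).1 < (PySem.List.pyGetD b 0 ((0:Int),(0:Int))).1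
          then some seg else some b) none) with _ | b
  · rw [hfold]; rfl
  · rw [hfold]; rfl

theorem pvBestLine_glue (g : List (List (Option String))) (kI : Int) (ts : List Int)
    (linecol : Int → Int → Int) (lof hif : Int → Int) :
    pvBestLine g kI (ts.map (fun d => (PySem.List.pyRange (lof d) (hif d) 1).map (fun ρ => (ρ, linecol d ρ))))
    = (ts.foldl (fun best d =>
        match pvScan kI ((PySem.List.pyRange (lof d) (hif d) 1).map (fun ρ => pvCell g ρ (linecol d ρ))) none 0 0 with
        | none => best
        | some j =>
          let seg := PySem.List.slice ((PySem.List.pyRange (lof d) (hif d) 1).map (fun ρ => (ρ, linecol d ρ)))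
            (some (j - kI + 1)) (some (j + 1))
          match best with
          | none => some seg
          | some b => if (PySem.List.pyGetD seg 0 ((0:Int),(0:Int))).1 < (PySem.List.pyGetD b 0 ((0:Int),(0:Int))).1
            then some seg else some b) none).map pvDict := by
  rw [pvBestLine_eq, List.foldl_map]
  congr 1
  apply PySem.List.foldl_congr_mem
  intro acc d _
  rw [List.map_map]
  rfl

-- glue with the direction-shaped column expressions of the two ports
theorem pvGlue' (fA fB : Int → Int → Option String) (R C k : Nat) (hk : 1 ≤ k)
    (dc clo chi tlo thi : Int) (lo hi : Int → Int) (acol bcol : Int → Int → Int)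
    (hacol : ∀ c i : Int, acol c i = c + dc*i) (hbcol : ∀ d ρ : Int, bcol d ρ = d + dc*ρ)
    (hf : ∀ r c : Int, 0 ≤ r → r < (R:Int) → 0 ≤ c → c < (C:Int) → fB r c = fA r c)
    (hlh : ∀ d, tlo ≤ d → d < thi →
      ∀ r : Int, (lo d ≤ r ∧ r < hi d) ↔ (0 ≤ r ∧ r < (R:Int) ∧ 0 ≤ d + dc*r ∧ d + dc*r < (C:Int)))
    (hcc : ∀ c : Int, (clo ≤ c ∧ c < chi) ↔
      (0 ≤ c ∧ c < (C:Int) ∧ 0 ≤ c + dc*((k:Int)-1) ∧ c + dc*((k:Int)-1) < (C:Int)))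
    (htt : ∀ r c : Int, 0 ≤ r → r < (R:Int) → 0 ≤ c → c < (C:Int) →
      tlo ≤ c - dc*r ∧ c - dc*r < thi)
    (hdc : dc = 0 ∨ dc = 1 ∨ dc = -1) :
    (PySem.List.pyRange 0 ((R:Int) - (k:Int) + 1) 1).findSome? (fun r =>
      (PySem.List.pyRange clo chi 1).findSome? (fun c =>
        if pvTruthy (fA r c) && (PySem.List.pyRange 0 (k:Int) 1).all (fun i => fA (r+i) (acol c i) == fA r c)
        then some ((PySem.List.pyRange 0 (k:Int) 1).map (fun i => [("x", r+i), ("y", acol c i)]))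
        else none))
    = ((PySem.List.pyRange tlo thi 1).foldl (fun best d =>
        match pvScan (k:Int) ((PySem.List.pyRange (lo d) (hi d) 1).map (fun ρ => fB ρ (bcol d ρ))) none 0 0 with
        | none => best
        | some j =>
          let seg := PySem.List.slice ((PySem.List.pyRange (lo d) (hi d) 1).map (fun ρ => (ρ, bcol d ρ)))
            (some (j - (k:Int) + 1)) (some (j + 1))
          match best with
          | none => some seg
          | some b => if (PySem.List.pyGetD seg 0 ((0:Int),(0:Int))).1 < (PySem.List.pyGetD b 0 ((0:Int),(0:Int))).1
            then some seg else some b) none).map pvDict := by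
  simp only [hacol, hbcol]
  exact pvGlue fA fB R C k hk dc clo chi tlo thi lo hi hf hlh hcc htt hdc

-- ===== VERDICT (by name: the statement is the Claim_ definition above) =====
theorem find_winning_line_spec : Claim_equal_find_winning_line := by
  intro board win_len _ hpre
  obtain ⟨hwk, -⟩ := hpre
  unfold Spec_find_winning_line find_winning_line find_winning_line_alt
  have hkI : win_len = ((win_len.toNat : Nat) : Int) := by omega
  rw [hkI]
  dsimp only
  rw [pvColsNorm board]
  have hk1 : 1 ≤ win_len.toNat := by omega
  rcases Nat.eq_zero_or_pos board.length with hR0 | hRpos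
  · -- empty board: every pass is a scan of an empty list of candidates
    have hb : board = [] := List.length_eq_zero_iff.1 hR0
    subst hb
    simp only [List.headD_nil, List.length_nil, Nat.cast_zero, List.map_nil]
    generalize hkk : ((win_len.toNat : Nat) : Int) = kk
    have hkk1 : (1:Int) ≤ kk := by rw [← hkk]; omega
    have e0 : PySem.List.pyRange 0 0 1 = [] := PySem.List.pyRange_one_eq_nil le_rfl
    have e2 : PySem.List.pyRange (kk - 1) 0 1 = [] :=
      PySem.List.pyRange_one_eq_nil (by omega)
    have e4 : PySem.List.pyRange 0 (-kk + 1) 1 = [] :=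
      PySem.List.pyRange_one_eq_nil (by omega)
    simp [e0, e2, e4, pvBestLine]
  · have hR0' : ((board.length:Nat):Int) > 0 := by exact_mod_cast hRpos
    rw [if_pos hR0']
    -- horizontal pass
    have hH := pvFindSome?_congr (PySem.List.pyRange 0 ((board.length:Nat):Int) 1) _ _
      (fun r hr => by
        have hrb := PySem.List.mem_pyRange_one.1 hr
        obtain ⟨hlen, hgetd⟩ := pvGridRow board ((board.headD []).length) r hrb.1 hrb.2
        exact pvHoriz (pvCell board) ((board.headD []).length) (win_len.toNat) hk1 r _ hlen hgetd)
    rw [hH]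
    -- vertical pass
    rw [pvBestLine_glue (board.map (fun row => PySem.List.slice row none (some (((board.headD []).length:Nat):Int)) ++ List.replicate ((((((board.headD []).length:Nat):Int)) - (row.length:Int)).toNat) (none : Option String)))
      ((win_len.toNat:Nat):Int) (PySem.List.pyRange 0 (((board.headD []).length:Nat):Int) 1)
      (fun c _ => c) (fun _ => 0) (fun _ => ((board.length:Nat):Int))]
    rw [pvGlue' (pvCell board)
      (pvCell (board.map (fun row => PySem.List.slice row none (some (((board.headD []).length:Nat):Int)) ++ List.replicate ((((((board.headD []).length:Nat):Int)) - (row.length:Int)).toNat) (none : Option String))))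
      board.length (board.headD []).length win_len.toNat hk1
      0 0 (((board.headD []).length:Nat):Int) 0 (((board.headD []).length:Nat):Int)
      (fun _ => 0) (fun _ => ((board.length:Nat):Int)) (fun c _ => c) (fun d _ => d)
      (fun c i => by ring) (fun d ρ => by ring)
      (fun r c h0 h1 h2 h3 => pvCell_grid board _ r c h0 h1 h2 h3)
      (fun d h1 h2 r => by dsimp only; omega)
      (fun c => by omega)
      (fun r c h0 h1 h2 h3 => by omega)
      (Or.inl rfl)]
    -- diagonal down-right pass
    rw [pvBestLine_glue (board.map (fun row => PySem.List.slice row none (some (((board.headD []).length:Nat):Int)) ++ List.replicate ((((((board.headD []).length:Nat):Int)) - (row.length:Int)).toNat) (none : Option String)))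
      ((win_len.toNat:Nat):Int)
      (PySem.List.pyRange (-(((board.length:Nat):Int) - 1)) (((board.headD []).length:Nat):Int) 1)
      (fun d ρ => ρ + d) (fun d => max 0 (-d))
      (fun d => min ((board.length:Nat):Int) ((((board.headD []).length:Nat):Int) - d))]
    rw [pvGlue' (pvCell board)
      (pvCell (board.map (fun row => PySem.List.slice row none (some (((board.headD []).length:Nat):Int)) ++ List.replicate ((((((board.headD []).length:Nat):Int)) - (row.length:Int)).toNat) (none : Option String))))
      board.length (board.headD []).length win_len.toNat hk1
      1 0 ((((board.headD []).length:Nat):Int) - (win_len.toNat:Int) + 1)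
      (-(((board.length:Nat):Int) - 1)) (((board.headD []).length:Nat):Int)
      (fun d => max 0 (-d)) (fun d => min ((board.length:Nat):Int) ((((board.headD []).length:Nat):Int) - d))
      (fun c i => c + i) (fun d ρ => ρ + d)
      (fun c i => by ring) (fun d ρ => by ring)
      (fun r c h0 h1 h2 h3 => pvCell_grid board _ r c h0 h1 h2 h3)
      (fun d h1 h2 r => by dsimp only; omega)
      (fun c => by omega)
      (fun r c h0 h1 h2 h3 => by omega)
      (Or.inr (Or.inl rfl))]
    -- diagonal down-left pass
    rw [pvBestLine_glue (board.map (fun row => PySem.List.slice row none (some (((board.headD []).length:Nat):Int)) ++ List.replicate ((((((board.headD []).length:Nat):Int)) - (row.length:Int)).toNat) (none : Option String)))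
      ((win_len.toNat:Nat):Int)
      (PySem.List.pyRange 0 (((board.length:Nat):Int) + (((board.headD []).length:Nat):Int) - 1) 1)
      (fun d ρ => d - ρ) (fun d => max 0 (d - (((board.headD []).length:Nat):Int) + 1))
      (fun d => min ((board.length:Nat):Int) (d + 1))]
    rw [pvGlue' (pvCell board)
      (pvCell (board.map (fun row => PySem.List.slice row none (some (((board.headD []).length:Nat):Int)) ++ List.replicate ((((((board.headD []).length:Nat):Int)) - (row.length:Int)).toNat) (none : Option String))))
      board.length (board.headD []).length win_len.toNat hk1
      (-1) ((win_len.toNat:Int) - 1) (((board.headD []).length:Nat):Int)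
      0 (((board.length:Nat):Int) + (((board.headD []).length:Nat):Int) - 1)
      (fun d => max 0 (d - (((board.headD []).length:Nat):Int) + 1))
      (fun d => min ((board.length:Nat):Int) (d + 1))
      (fun c i => c - i) (fun d ρ => d - ρ)
      (fun c i => by ring) (fun d ρ => by ring)
      (fun r c h0 h1 h2 h3 => pvCell_grid board _ r c h0 h1 h2 h3)
      (fun d h1 h2 r => by dsimp only; omega)
      (fun c => by omega)
      (fun r c h0 h1 h2 h3 => by omega)
      (Or.inr (Or.inr rfl))]
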